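-- pv_equiv track=rewrite | github.com/jayathu4/OD_pair_Analysis | Code/calc_functions.py | calculate_origin_station
-- ===== SOURCE A (Python) =====
-- def calculate_origin_station(path_type, origin, ib_boubndary_station, ob_boundary_station, path):
--     if path_type == "Origin trip":
--         return origin
--     elif path_type == "Destination trip":
--         for station in path:
--             if station == ib_boubndary_station:
--                 return ib_boubndary_station
--             elif station == ob_boundary_station:
--                 return ob_boundary_station
--     elif path_type == "Internal trip":
--         return origin
--     elif path_type == "Passing trip":
--         for station in path:
--             if station == ib_boubndary_station:
--                 return ib_boubndary_station
--             elif station == ob_boundary_station: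
--                 return ob_boundary_station
-- ===== SOURCE B (Python) =====
-- def calculate_origin_station(path_type, origin, ib_boubndary_station, ob_boundary_station, path):
--     if path_type in ("Origin trip", "Internal trip"):
--         return origin
--     if path_type in ("Destination trip", "Passing trip"):
--         n = len(path)
--         ib_idx = path.index(ib_boubndary_station) if ib_boubndary_station in path else n
--         ob_idx = path.index(ob_boundary_station) if ob_boundary_station in path else n
--         if ib_idx < n or ob_idx < n:
--             return ib_boubndary_station if ib_idx <= ob_idx else ob_boundary_station
--     return None
-- ===== Notes on version B (the rewrite author's own statement) =====
-- stated objective: alternative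
-- what changed: Replaces A's fused first-match scan (checking both boundary stations per element) with two independent first-occurrence index lookups plus an index comparison with <= tie-break, and merges the duplicated trip-type branches.
import Mathlib
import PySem

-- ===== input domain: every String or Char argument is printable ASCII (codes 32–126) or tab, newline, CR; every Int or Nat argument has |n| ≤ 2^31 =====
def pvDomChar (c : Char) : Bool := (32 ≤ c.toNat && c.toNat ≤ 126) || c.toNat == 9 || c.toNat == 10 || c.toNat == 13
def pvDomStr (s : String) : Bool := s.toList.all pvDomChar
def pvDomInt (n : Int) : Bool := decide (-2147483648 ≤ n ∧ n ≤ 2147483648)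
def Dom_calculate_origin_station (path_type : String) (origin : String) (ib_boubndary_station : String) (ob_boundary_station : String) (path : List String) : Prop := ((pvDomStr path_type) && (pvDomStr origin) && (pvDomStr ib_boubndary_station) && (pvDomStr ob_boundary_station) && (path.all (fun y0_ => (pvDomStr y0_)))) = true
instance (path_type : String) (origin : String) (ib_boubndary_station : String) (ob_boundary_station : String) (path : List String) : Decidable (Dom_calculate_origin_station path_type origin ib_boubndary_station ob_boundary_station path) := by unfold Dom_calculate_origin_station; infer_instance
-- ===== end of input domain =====

-- B merges the duplicated trip-type branches and replaces the fused first-match scan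
-- with two independent first-occurrence index lookups compared with a <= tie-break (objective: alternative).
-- ===== PORT A =====
-- the fused for-loop of the 'Destination trip' / 'Passing trip' branches
def pvScanA (ib ob : String) : List String → Option String
  | [] => none
  | s :: rest =>
    if s = ib then some ib
    else if s = ob then some ob
    else pvScanA ib ob rest

def calculate_origin_station (path_type : String) (origin : String) (ib_boubndary_station : String) (ob_boundary_station : String) (path : List String) : Option String :=
  if path_type = "Origin trip" then some origin
  else if path_type = "Destination trip" then pvScanA ib_boubndary_station ob_boundary_station path
  else if path_type = "Internal trip" then some origin
  else if path_type = "Passing trip" then pvScanA ib_boubndary_station ob_boundary_station path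
  else none

-- ===== PORT B =====
def calculate_origin_station_alt (path_type : String) (origin : String) (ib_boubndary_station : String) (ob_boundary_station : String) (path : List String) : Option String :=
  if path_type = "Origin trip" ∨ path_type = "Internal trip" then some origin
  else if path_type = "Destination trip" ∨ path_type = "Passing trip" then
    let n := path.length
    let ib_idx := (PySem.List.index? path ib_boubndary_station).getD n
    let ob_idx := (PySem.List.index? path ob_boundary_station).getD n
    if ib_idx < n ∨ ob_idx < n then
      if ib_idx ≤ ob_idx then some ib_boubndary_station else some ob_boundary_station
    else none
  else none

-- ===== PRECONDITION & SPEC =====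
def Spec_calculate_origin_station (path_type : String) (origin : String) (ib_boubndary_station : String) (ob_boundary_station : String) (path : List String) (out : Option String) : Prop := out = calculate_origin_station_alt path_type origin ib_boubndary_station ob_boundary_station path
instance (path_type : String) (origin : String) (ib_boubndary_station : String) (ob_boundary_station : String) (path : List String) (out : Option String) : Decidable (Spec_calculate_origin_station path_type origin ib_boubndary_station ob_boundary_station path out) := by unfold Spec_calculate_origin_station; infer_instance

-- ===== CLAIM (what is proved, stated in full; the proofs are below) =====
def Claim_equal_calculate_origin_station : Prop := ∀ (path_type : String) (origin : String) (ib_boubndary_station : String) (ob_boundary_station : String) (path : List String), Dom_calculate_origin_station path_type origin ib_boubndary_station ob_boundary_station path → Spec_calculate_origin_station path_type origin ib_boubndary_station ob_boundary_station path (calculate_origin_station path_type origin ib_boubndary_station ob_boundary_station path)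

-- ===== LEMMAS AND PROOFS =====

lemma scan_eq_idx (ib ob : String) (l : List String) :
    pvScanA ib ob l =
      (if (PySem.List.index? l ib).getD l.length < l.length ∨
          (PySem.List.index? l ob).getD l.length < l.length then
        if (PySem.List.index? l ib).getD l.length ≤ (PySem.List.index? l ob).getD l.length
        then some ib else some ob
      else none) := by
  induction l with
  | nil => simp [pvScanA]
  | cons s rest ih =>
    by_cases hib : s = ib
    · subst hib
      rw [pvScanA, if_pos rfl, PySem.List.index?_cons_self]
      simp
    · by_cases hob : s = ob
      · subst hob
        rw [pvScanA, if_neg hib, if_pos rfl, PySem.List.index?_cons_self,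
            PySem.List.index?_cons_of_ne rest hib]
        cases PySem.List.index? rest ib with
        | none => simp
        | some k => simp
      · rw [pvScanA, if_neg hib, if_neg hob, ih,
            PySem.List.index?_cons_of_ne rest hib, PySem.List.index?_cons_of_ne rest hob]
        cases PySem.List.index? rest ib with
        | none =>
          cases PySem.List.index? rest ob with
          | none => simp
          | some m => simp; rfl
        | some k =>
          cases PySem.List.index? rest ob with
          | none => simp; rfl
          | some m => simp; rfl

-- ===== VERDICT (by name: the statement is the Claim_ definition above) =====
theorem calculate_origin_station_spec : Claim_equal_calculate_origin_station := by
  intro pt o ib ob path _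
  unfold Spec_calculate_origin_station calculate_origin_station calculate_origin_station_alt
  by_cases h1 : pt = "Origin trip" <;> by_cases h2 : pt = "Destination trip" <;>
    by_cases h3 : pt = "Internal trip" <;> by_cases h4 : pt = "Passing trip" <;>
    simp [h1, h2, h3, h4, scan_eq_idx]
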